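-- pv_equiv track=rewrite | github.com/xidchen/mednlp | mednlp/model/knowledge_extraction_model.py | label_list_alter
-- ===== SOURCE A (Python) =====
-- def label_list_alter(list_data, label):
--     '''
--     tran_list:规则模型中特有，将两个目标标签中间隔的一个非目标标签页替换为目标标签
--     '''
--     index_list = []
--     for index, m in enumerate(list_data):
--         if m == label:
--             index_list.append(index)
--         else:
--             pass
--     for l in range(1, len(index_list)):
--         if index_list[l] - index_list[l-1] == 2:
--             list_data[index_list[l]-1] = label
--         else:
--             pass
--     return list_data
-- ===== SOURCE B (Python) =====
-- def label_list_alter(list_data, label):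
--     '''
--     Single sliding-window pass over a snapshot of the original list:
--     fill any one-element gap between two occurrences of `label`.
--     Mutates list_data in place and returns the same object (like A).
--     '''
--     snapshot = list(list_data)
--     for i in range(1, len(snapshot) - 1):
--         if snapshot[i - 1] == label and snapshot[i + 1] == label:
--             list_data[i] = label
--     return list_data
-- ===== Notes on version B (the rewrite author's own statement) =====
-- stated objective: simpler
-- what changed: Replaced the two-pass algorithm (collect all label indices, then scan adjacent index pairs for gaps of 2) with a single sliding-window pass that fills position i whenever positions i-1 and i+1 of a snapshot both hold the label, eliminating the index table.
import Mathlib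
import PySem

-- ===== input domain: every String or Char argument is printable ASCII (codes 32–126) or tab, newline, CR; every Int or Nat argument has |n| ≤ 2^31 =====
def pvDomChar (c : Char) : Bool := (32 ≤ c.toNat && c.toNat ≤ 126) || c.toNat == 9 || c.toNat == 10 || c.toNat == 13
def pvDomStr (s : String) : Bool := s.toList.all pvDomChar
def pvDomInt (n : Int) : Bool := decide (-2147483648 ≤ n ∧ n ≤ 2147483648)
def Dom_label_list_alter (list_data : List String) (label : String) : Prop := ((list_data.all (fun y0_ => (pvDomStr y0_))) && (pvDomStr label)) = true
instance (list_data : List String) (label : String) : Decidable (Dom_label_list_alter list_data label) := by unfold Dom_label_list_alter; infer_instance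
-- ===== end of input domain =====

-- B replaces A's two passes (collect label indices, then scan adjacent index pairs) by one
-- sliding-window pass over a snapshot; A mutates list_data in place, equivalence is about the
-- returned value (B performs the same in-place mutation in Python).

-- ===== PORT A =====
def label_list_alter (list_data : List String) (label : String) : List String :=
  -- index_list = []; for index, m in enumerate(list_data): if m == label: index_list.append(index)
  let index_list : List Int :=
    (PySem.List.enumerate list_data 0).foldl
      (fun il p => if p.2 = label then il ++ [p.1] else il) []
  -- for l in range(1, len(index_list)): if il[l] - il[l-1] == 2: list_data[il[l]-1] = label
  -- (the write index il[l]-1 is always a valid nonnegative index, so pySetD is exact here)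
  (PySem.List.pyRange 1 (index_list.length : Int) 1).foldl
    (fun acc l =>
      if PySem.List.pyGetD index_list l 0 - PySem.List.pyGetD index_list (l - 1) 0 = 2 then
        PySem.List.pySetD acc (PySem.List.pyGetD index_list l 0 - 1) label
      else acc)
    list_data

-- ===== PORT B =====
def label_list_alter_alt (list_data : List String) (label : String) : List String :=
  -- snapshot = list(list_data)
  let snapshot : List String := list_data
  -- for i in range(1, len(snapshot)-1): if snapshot[i-1]==label and snapshot[i+1]==label: list_data[i]=label
  -- (indices i-1, i, i+1 are always in range, so pyGetD/pySetD are exact here)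
  (PySem.List.pyRange 1 ((snapshot.length : Int) - 1) 1).foldl
    (fun acc i =>
      if PySem.List.pyGetD snapshot (i - 1) "" = label ∧ PySem.List.pyGetD snapshot (i + 1) "" = label then
        PySem.List.pySetD acc i label
      else acc)
    list_data

-- ===== PRECONDITION & SPEC =====
def Spec_label_list_alter (list_data : List String) (label : String) (out : List String) : Prop := out = label_list_alter_alt list_data label
instance (list_data : List String) (label : String) (out : List String) : Decidable (Spec_label_list_alter list_data label out) := by unfold Spec_label_list_alter; infer_instance

-- ===== CLAIM (what is proved, stated in full; the proofs are below) =====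
def Claim_equal_label_list_alter : Prop := ∀ (list_data : List String) (label : String), Dom_label_list_alter list_data label → Spec_label_list_alter list_data label (label_list_alter list_data label)

-- ===== LEMMAS AND PROOFS =====

-- The index list A builds, in filtered form.
def pvIL (xs : List String) (label : String) : List Int :=
  ((PySem.List.enumerate xs 0).filter (fun p => p.2 == label)).map (·.1)

lemma pvIL_eq (xs : List String) (label : String) :
    (PySem.List.enumerate xs 0).foldl
      (fun il p => if p.2 = label then il ++ [p.1] else il) ([] : List Int)
    = pvIL xs label := by
  have h := PySem.List.foldl_append_if (fun p : Int × String => p.2 == label)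
    (fun p => p.1) (PySem.List.enumerate xs 0) ([] : List Int)
  simpa [pvIL] using h

lemma mem_pvIL (xs : List String) (label : String) (j : Int) :
    j ∈ pvIL xs label ↔ ∃ k : Nat, k < xs.length ∧ j = (k : Int) ∧ xs[k]? = some label := by
  simp only [pvIL, List.mem_map, List.mem_filter]
  constructor
  · rintro ⟨p, ⟨hp, hlab⟩, rfl⟩
    rcases (PySem.List.mem_enumerate_iff xs 0 p).1 hp with ⟨k, hk, rfl⟩
    exact ⟨k, hk, by simp, by simpa [List.getElem?_eq_getElem hk] using (beq_iff_eq.mp hlab)⟩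
  · rintro ⟨k, hk, rfl, hlab⟩
    refine ⟨((k : Int), xs[k]), ⟨(PySem.List.mem_enumerate_iff xs 0 _).2 ⟨k, hk, by simp⟩, ?_⟩, rfl⟩
    have : xs[k] = label := by
      have := List.getElem?_eq_getElem hk ▸ hlab; exact Option.some.inj this
    simpa using this

lemma pairwise_pvIL (xs : List String) (label : String) :
    (pvIL xs label).Pairwise (· < ·) := by
  have h := PySem.List.pairwise_lt_enumerate xs 0
  exact ((h.filter _).map _ (fun a b hab => hab))

lemma nonneg_of_mem_pvIL (xs : List String) (label : String) {j : Int}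
    (h : j ∈ pvIL xs label) : 0 ≤ j := by
  rcases (mem_pvIL xs label j).1 h with ⟨k, _, rfl, _⟩; exact Int.natCast_nonneg k

-- Generic write-loop characterisation: a fold of conditional in-place writes of the SAME
-- value `label` at nonnegative targets, read pointwise.
lemma foldl_pySetD_getElem? (label : String) (c : Int → Prop) [DecidablePred c]
    (g : Int → Int) (ts : List Int) (hg : ∀ t ∈ ts, c t → 0 ≤ g t)
    (xs : List String) (k : Nat) :
    (ts.foldl (fun acc t => if c t then PySem.List.pySetD acc (g t) label else acc) xs)[k]? =
      if (∃ t ∈ ts, c t ∧ g t = (k : Int)) ∧ k < xs.length then some label else xs[k]? := by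
  induction ts generalizing xs with
  | nil => simp
  | cons t ts ih =>
    simp only [List.foldl_cons]
    by_cases hc : c t
    · have h0 : 0 ≤ g t := hg t (by simp) hc
      rw [if_pos hc, ih (fun u hu hcu => hg u (by simp [hu]) hcu) _,
          PySem.List.pySetD_of_nonneg _ _ h0]
      simp only [List.length_set, List.getElem?_set, List.mem_cons]
      by_cases hk : k < xs.length
      · by_cases hex : ∃ u ∈ ts, c u ∧ g u = (k : Int)
        · simp [hex, hk]
        · by_cases htk : g t = (k : Int)
          · have h1 : (g t).toNat = k := by omega
            simp [hex, hk, h1]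
            exact fun h => absurd htk (h hc)
          · have h1 : (g t).toNat ≠ k := by omega
            simp [hex, hk, h1]
            exact fun _ h => absurd h htk
      · have h2 : ¬ ((∃ u ∈ t :: ts, c u ∧ g u = (k : Int)) ∧ k < xs.length) := fun h => hk h.2
        have h3 : ¬ ((∃ u ∈ ts, c u ∧ g u = (k : Int)) ∧ k < xs.length) := fun h => hk h.2
        have hnone : xs[k]? = none := List.getElem?_eq_none (by omega)
        rw [if_neg h3, if_neg h2, hnone]
        split
        · next h => exact if_neg (by omega)
        · rfl
    · rw [if_neg hc, ih (fun u hu hcu => hg u (by simp [hu]) hcu) _]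
      have hiff : (∃ u ∈ t :: ts, c u ∧ g u = (k : Int)) ↔ (∃ u ∈ ts, c u ∧ g u = (k : Int)) := by
        constructor
        · rintro ⟨u, hu, h⟩
          rcases List.mem_cons.mp hu with rfl | hu'
          · exact absurd h.1 hc
          · exact ⟨u, hu', h⟩
        · rintro ⟨u, hu, h⟩; exact ⟨u, by simp [hu], h⟩
      simp only [hiff]

-- A writes position k iff some adjacent pair of the index list is (k-1, k+1).
def pvAdj (il : List Int) (k : Nat) : Prop :=
  ∃ j : Nat, ∃ h : j + 1 < il.length,
    il[j + 1]'h - il[j]'(by omega) = 2 ∧ (k : Int) = il[j + 1]'h - 1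

-- B writes position k iff its two neighbours (in the snapshot) hold the label.
def pvFlank (xs : List String) (label : String) (k : Nat) : Prop :=
  1 ≤ k ∧ k + 1 < xs.length ∧ xs[k - 1]? = some label ∧ xs[k + 1]? = some label

lemma A_fold (xs : List String) (label : String) (k : Nat) :
    (label_list_alter xs label)[k]? =
      if (∃ t ∈ PySem.List.pyRange 1 ((pvIL xs label).length : Int) 1,
            (PySem.List.pyGetD (pvIL xs label) t 0 - PySem.List.pyGetD (pvIL xs label) (t - 1) 0 = 2) ∧
            PySem.List.pyGetD (pvIL xs label) t 0 - 1 = (k : Int)) ∧ k < xs.length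
      then some label else xs[k]? := by
  unfold label_list_alter
  simp only [pvIL_eq]
  have hg : ∀ t ∈ PySem.List.pyRange 1 ((pvIL xs label).length : Int) 1,
      (PySem.List.pyGetD (pvIL xs label) t 0 - PySem.List.pyGetD (pvIL xs label) (t - 1) 0 = 2) →
      0 ≤ PySem.List.pyGetD (pvIL xs label) t 0 - 1 := by
    intro t ht hct
    rcases PySem.List.mem_pyRange_one.mp ht with ⟨h1, h2⟩
    have hprev : PySem.List.pyGetD (pvIL xs label) (t - 1) 0 ∈ pvIL xs label :=
      PySem.List.pyGetD_mem (pvIL xs label) 0 (by constructor <;> omega)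
    have : 0 ≤ PySem.List.pyGetD (pvIL xs label) (t - 1) 0 := nonneg_of_mem_pvIL xs label hprev
    omega
  exact foldl_pySetD_getElem? label _ _ _ hg xs k

lemma A_cond_iff (xs : List String) (label : String) (k : Nat) :
    (∃ t ∈ PySem.List.pyRange 1 ((pvIL xs label).length : Int) 1,
        (PySem.List.pyGetD (pvIL xs label) t 0 - PySem.List.pyGetD (pvIL xs label) (t - 1) 0 = 2) ∧
        PySem.List.pyGetD (pvIL xs label) t 0 - 1 = (k : Int))
      ↔ pvAdj (pvIL xs label) k := by
  constructor
  · rintro ⟨t, ht, hct, hgt⟩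
    rcases PySem.List.mem_pyRange_one.mp ht with ⟨h1, h2⟩
    have hb1 : PySem.List.pyGetD (pvIL xs label) t 0 = (pvIL xs label)[t.toNat]'(by omega) :=
      PySem.List.pyGetD_eq_getElem (pvIL xs label) 0 (by omega) h2
    have hb2 : PySem.List.pyGetD (pvIL xs label) (t - 1) 0
        = (pvIL xs label)[(t - 1).toNat]'(by omega) :=
      PySem.List.pyGetD_eq_getElem (pvIL xs label) 0 (by omega) (by omega)
    have hidx : (t - 1).toNat + 1 = t.toNat := by omega
    refine ⟨(t - 1).toNat, by omega, ?_, ?_⟩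
    · simp only [hidx]; rw [hb1, hb2] at hct; exact hct
    · simp only [hidx]; rw [hb1] at hgt; omega
  · rintro ⟨j, h, hdiff, hk⟩
    have hb1 : PySem.List.pyGetD (pvIL xs label) ((j : Int) + 1) 0 = (pvIL xs label)[j + 1]'h := by
      have := PySem.List.pyGetD_eq_getElem (pvIL xs label) (i := (j : Int) + 1) 0
        (by omega) (by omega)
      simpa [show ((j : Int) + 1).toNat = j + 1 by omega] using this
    have hb2 : PySem.List.pyGetD (pvIL xs label) ((j : Int) + 1 - 1) 0
        = (pvIL xs label)[j]'(by omega) := by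
      have := PySem.List.pyGetD_eq_getElem (pvIL xs label) (i := (j : Int) + 1 - 1) 0
        (by omega) (by omega)
      simpa [show ((j : Int) + 1 - 1).toNat = j by omega] using this
    refine ⟨(j : Int) + 1, PySem.List.mem_pyRange_one.mpr ⟨by omega, by omega⟩, ?_, ?_⟩
    · rw [hb1, hb2]; exact hdiff
    · rw [hb1]; omega

lemma B_fold (xs : List String) (label : String) (k : Nat) :
    (label_list_alter_alt xs label)[k]? =
      @ite _ ((∃ t ∈ PySem.List.pyRange 1 ((xs.length : Int) - 1) 1,
            (PySem.List.pyGetD xs (t - 1) "" = label ∧ PySem.List.pyGetD xs (t + 1) "" = label) ∧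
            t = (k : Int)) ∧ k < xs.length)
        (@instDecidableAnd _ _ (List.decidableBEx _ _) (Nat.decLt _ _))
        (some label) xs[k]? := by
  unfold label_list_alter_alt
  have hg : ∀ t ∈ PySem.List.pyRange 1 ((xs.length : Int) - 1) 1,
      (PySem.List.pyGetD xs (t - 1) "" = label ∧ PySem.List.pyGetD xs (t + 1) "" = label) →
      0 ≤ t := by
    intro t ht _
    rcases PySem.List.mem_pyRange_one.mp ht with ⟨h1, _⟩
    omega
  exact foldl_pySetD_getElem? label _ _ _ hg xs k

lemma B_cond_iff (xs : List String) (label : String) (k : Nat) :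
    (∃ t ∈ PySem.List.pyRange 1 ((xs.length : Int) - 1) 1,
        (PySem.List.pyGetD xs (t - 1) "" = label ∧ PySem.List.pyGetD xs (t + 1) "" = label) ∧
        t = (k : Int))
      ↔ pvFlank xs label k := by
  constructor
  · rintro ⟨t, ht, ⟨hl, hr⟩, htk⟩
    subst htk
    rcases PySem.List.mem_pyRange_one.mp ht with ⟨h1, h2⟩
    have hk1 : 1 ≤ k := by omega
    have hk2 : k + 1 < xs.length := by omega
    have hb1 : PySem.List.pyGetD xs ((k : Int) - 1) "" = xs[k - 1]'(by omega) := by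
      have := PySem.List.pyGetD_eq_getElem xs (i := (k : Int) - 1) "" (by omega) (by omega)
      simpa [show ((k : Int) - 1).toNat = k - 1 by omega] using this
    have hb2 : PySem.List.pyGetD xs ((k : Int) + 1) "" = xs[k + 1]'(by omega) := by
      have := PySem.List.pyGetD_eq_getElem xs (i := (k : Int) + 1) "" (by omega) (by omega)
      simpa [show ((k : Int) + 1).toNat = k + 1 by omega] using this
    refine ⟨hk1, hk2, ?_, ?_⟩
    · rw [List.getElem?_eq_getElem (show k - 1 < xs.length by omega)]
      rw [hb1] at hl; simp [hl]
    · rw [List.getElem?_eq_getElem (show k + 1 < xs.length by omega)]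
      rw [hb2] at hr; simp [hr]
  · rintro ⟨hk1, hk2, hl, hr⟩
    refine ⟨(k : Int), PySem.List.mem_pyRange_one.mpr ⟨by omega, by omega⟩, ⟨?_, ?_⟩, rfl⟩
    · have hb1 : PySem.List.pyGetD xs ((k : Int) - 1) "" = xs[k - 1]'(by omega) := by
        have := PySem.List.pyGetD_eq_getElem xs (i := (k : Int) - 1) "" (by omega) (by omega)
        simpa [show ((k : Int) - 1).toNat = k - 1 by omega] using this
      rw [hb1]
      rw [List.getElem?_eq_getElem (by omega)] at hl
      exact Option.some.inj hl
    · have hb2 : PySem.List.pyGetD xs ((k : Int) + 1) "" = xs[k + 1]'(by omega) := by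
        have := PySem.List.pyGetD_eq_getElem xs (i := (k : Int) + 1) "" (by omega) (by omega)
        simpa [show ((k : Int) + 1).toNat = k + 1 by omega] using this
      rw [hb2]
      rw [List.getElem?_eq_getElem (by omega)] at hr
      exact Option.some.inj hr

-- The two write conditions agree except possibly where xs[k] is already the label.
lemma adj_of_flank (xs : List String) (label : String) (k : Nat)
    (hP : xs[k]? ≠ some label) (hf : pvFlank xs label k) : pvAdj (pvIL xs label) k := by
  rcases hf with ⟨hk1, hk2, hl, hr⟩
  have hmono := (List.pairwise_iff_getElem).mp (pairwise_pvIL xs label)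
  have hmem1 : ((k - 1 : Nat) : Int) ∈ pvIL xs label :=
    (mem_pvIL xs label _).mpr ⟨k - 1, by omega, rfl, hl⟩
  have hmem2 : ((k + 1 : Nat) : Int) ∈ pvIL xs label :=
    (mem_pvIL xs label _).mpr ⟨k + 1, by omega, rfl, hr⟩
  rcases List.mem_iff_getElem.mp hmem1 with ⟨j, hj, hje⟩
  rcases List.mem_iff_getElem.mp hmem2 with ⟨m, hm, hme⟩
  have hjm : j < m := by
    rcases Nat.lt_trichotomy j m with h | h | h
    · exact h
    · exfalso; subst h; rw [hje] at hme; push_cast at hme; omega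
    · exfalso; have := hmono m j hm hj h; rw [hje, hme] at this; push_cast at this; omega
  have hjl : j + 1 < (pvIL xs label).length := by omega
  have hub : (pvIL xs label)[j + 1]'hjl ≤ ((k + 1 : Nat) : Int) := by
    rcases Nat.lt_or_ge (j + 1) m with hlt | hge
    · have := hmono (j + 1) m hjl hm hlt
      rw [hme] at this; omega
    · have hjm2 : j + 1 = m := by omega
      have heq : (pvIL xs label)[j + 1]'hjl = (pvIL xs label)[m]'hm := by
        simp only [hjm2]
      rw [heq, hme]
  have hlb : ((k - 1 : Nat) : Int) < (pvIL xs label)[j + 1]'hjl := by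
    have := hmono j (j + 1) hj hjl (by omega)
    rw [hje] at this; exact this
  have hne : (pvIL xs label)[j + 1]'hjl ≠ (k : Int) := by
    intro heq
    rcases (mem_pvIL xs label _).mp (heq ▸ List.getElem_mem hjl) with ⟨kc, hkc, hkeq, hkl⟩
    have : kc = k := by omega
    exact hP (this ▸ hkl)
  have hval : (pvIL xs label)[j + 1]'hjl = ((k + 1 : Nat) : Int) := by
    push_cast at hub hlb ⊢
    omega
  exact ⟨j, hjl, by rw [hval, hje]; push_cast; omega, by rw [hval]; push_cast; omega⟩

lemma flank_of_adj (xs : List String) (label : String) (k : Nat)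
    (ha : pvAdj (pvIL xs label) k) : pvFlank xs label k := by
  rcases ha with ⟨j, h, hdiff, hk⟩
  rcases (mem_pvIL xs label _).mp (List.getElem_mem (show j < (pvIL xs label).length by omega))
    with ⟨ka, hka, hkae, hkal⟩
  rcases (mem_pvIL xs label _).mp (List.getElem_mem h) with ⟨kb, hkb, hkbe, hkbl⟩
  have e1 : (ka : Int) = (k : Int) - 1 := by omega
  have e2 : (kb : Int) = (k : Int) + 1 := by omega
  have hk1 : 1 ≤ k := by omega
  have hka' : ka = k - 1 := by omega
  have hkb' : kb = k + 1 := by omega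
  exact ⟨hk1, hkb' ▸ hkb, hka' ▸ hkal, hkb' ▸ hkbl⟩

-- ===== VERDICT (by name: the statement is the Claim_ definition above) =====
theorem label_list_alter_spec : Claim_equal_label_list_alter := by
  intro xs label _
  unfold Spec_label_list_alter
  apply List.ext_getElem?
  intro k
  rw [A_fold, B_fold]
  by_cases hP : xs[k]? = some label
  · split <;> split <;> simp [hP]
  · by_cases hf : pvFlank xs label k
    · by_cases hk : k < xs.length
      · rw [if_pos ⟨(A_cond_iff xs label k).mpr (adj_of_flank xs label k hP hf), hk⟩,
            if_pos ⟨(B_cond_iff xs label k).mpr hf, hk⟩]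
      · rw [if_neg (fun h => hk h.2), if_neg (fun h => hk h.2)]
    · have hna : ¬ pvAdj (pvIL xs label) k := fun ha => hf (flank_of_adj xs label k ha)
      rw [if_neg (fun h => hna ((A_cond_iff xs label k).mp h.1)),
          if_neg (fun h => hf ((B_cond_iff xs label k).mp h.1))]
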